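-- pv_equiv track=rewrite | github.com/Tmmn/advent-of-code | 2023/12/12.py | _is_valid_combination
-- ===== SOURCE A (Python) =====
-- def _is_valid_combination(combination, grouping):
--     groups = [g for g in combination.split(".") if g]
--     if len(groups) != len(grouping):
--         return False
--     for actual_group, expected_group in zip(groups, grouping):
--         if len(actual_group) != expected_group:
--             return False
--     return True
-- ===== SOURCE B (Python) =====
-- def _is_valid_combination(combination, grouping):
--     i = 0
--     run = 0
--     for ch in combination:
--         if ch == ".":
--             if run:
--                 if i >= len(grouping) or run != grouping[i]:
--                     return False
--                 i += 1
--                 run = 0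
--         else:
--             run += 1
--     if run:
--         if i >= len(grouping) or run != grouping[i]:
--             return False
--         i += 1
--     return i == len(grouping)
-- ===== Notes on version B (the rewrite author's own statement) =====
-- stated objective: alternative
-- what changed: Replaces split('.')-then-filter-then-zip with a single left-to-right scan that maintains a run length and an index into grouping, validating each run on the fly without building any intermediate lists.
import Mathlib
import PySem

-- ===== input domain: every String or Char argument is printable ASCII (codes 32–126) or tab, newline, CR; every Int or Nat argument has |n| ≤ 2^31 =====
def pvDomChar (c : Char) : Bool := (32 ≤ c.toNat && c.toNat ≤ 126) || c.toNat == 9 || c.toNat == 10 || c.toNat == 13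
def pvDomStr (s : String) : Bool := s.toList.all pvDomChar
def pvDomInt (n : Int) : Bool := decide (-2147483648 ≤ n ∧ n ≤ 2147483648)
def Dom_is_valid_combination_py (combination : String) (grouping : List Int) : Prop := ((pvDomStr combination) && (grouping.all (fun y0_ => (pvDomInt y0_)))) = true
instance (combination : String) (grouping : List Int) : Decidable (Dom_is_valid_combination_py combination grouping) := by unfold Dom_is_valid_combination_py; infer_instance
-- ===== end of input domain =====

-- B replaces split('.')-then-filter-then-zip by a single scan that validates each run on the fly; same cost, no intermediate lists.

-- ===== PORT A =====
-- the 'for actual_group, expected_group in zip(groups, grouping)' loop of A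
def pvAZip : List (String × Int) → Bool
  | [] => true
  | (a, e) :: rest => if (PySem.Str.len a : Int) ≠ e then false else pvAZip rest

def is_valid_combination_py (combination : String) (grouping : List Int) : Bool :=
  -- combination.split("."): the separator "." is non-empty, so split? never returns none
  match PySem.Str.split? combination "." with
  | none => false
  | some parts =>
    let groups := parts.filter (fun g => g != "")
    if groups.length ≠ grouping.length then false
    else pvAZip (groups.zip grouping)

-- ===== PORT B =====
-- one scan step of B: state = some (i, run) or none (an early 'return False')
def pvAltStep (grouping : List Int) (st : Option (Nat × Nat)) (c : Char) : Option (Nat × Nat) :=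
  match st with
  | none => none
  | some (i, run) =>
    if c = '.' then
      if run ≠ 0 then
        -- 'i >= len(grouping) or run != grouping[i]': grouping[i]? = some g ∧ run = g is its negation (0 ≤ i)
        match grouping[i]? with
        | some g => if (run : Int) = g then some (i + 1, 0) else none
        | none => none
      else some (i, run)
    else some (i, run + 1)

-- B's code after the loop: flush the final run, then 'return i == len(grouping)'
def pvAltFin (grouping : List Int) (st : Option (Nat × Nat)) : Bool :=
  match st with
  | none => false
  | some (i, run) =>
    if run ≠ 0 then
      match grouping[i]? with
      | some g => if (run : Int) = g then decide (i + 1 = grouping.length) else false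
      | none => false
    else decide (i = grouping.length)

def is_valid_combination_py_alt (combination : String) (grouping : List Int) : Bool :=
  pvAltFin grouping (combination.toList.foldl (pvAltStep grouping) (some (0, 0)))

-- ===== PRECONDITION & SPEC =====
def Spec_is_valid_combination_py (combination : String) (grouping : List Int) (out : Bool) : Prop := out = is_valid_combination_py_alt combination grouping
instance (combination : String) (grouping : List Int) (out : Bool) : Decidable (Spec_is_valid_combination_py combination grouping out) := by unfold Spec_is_valid_combination_py; infer_instance

-- ===== CLAIM (what is proved, stated in full; the proofs are below) =====
def Claim_equal_is_valid_combination_py : Prop := ∀ (combination : String) (grouping : List Int), Dom_is_valid_combination_py combination grouping → Spec_is_valid_combination_py combination grouping (is_valid_combination_py combination grouping)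

-- ===== LEMMAS AND PROOFS =====

-- reference: lengths of the maximal '.'-free runs of l, with `run` non-dot chars already pending
def pvGlAux : Nat → List Char → List Int
  | run, [] => if run = 0 then [] else [(run : Int)]
  | run, c :: rest =>
    if c = '.' then (if run = 0 then pvGlAux 0 rest else (run : Int) :: pvGlAux 0 rest)
    else pvGlAux (run + 1) rest

-- structural version of Chars.splitOn for the one-char separator '.'
def pvSplitA : List Char → List Char → List (List Char)
  | cur, [] => [cur.reverse]
  | cur, c :: rest => if c = '.' then cur.reverse :: pvSplitA [] rest else pvSplitA (c :: cur) rest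

theorem pvGo_eq (fuel : Nat) (l cur : List Char) (acc : List (List Char)) (h : l.length ≤ fuel) :
    PySem.Chars.splitOn.go ['.'] fuel l cur acc = acc.reverse ++ pvSplitA cur l := by
  induction fuel generalizing l cur acc with
  | zero =>
    have hl : l = [] := List.eq_nil_of_length_eq_zero (by omega)
    subst hl
    simp [PySem.Chars.splitOn.go, pvSplitA]
  | succ fuel ih =>
    cases l with
    | nil => simp [PySem.Chars.splitOn.go, pvSplitA]
    | cons c rest =>
      rw [PySem.Chars.splitOn.go.eq_def]
      simp only [List.isPrefixOf, List.length_cons] at *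
      by_cases hc : c = '.'
      · subst hc
        simp [pvSplitA, ih rest [] _ (by omega), ih rest _ _ (by omega)]
      · simp [pvSplitA, hc, BEq.symm_false, ih rest (c :: cur) acc (by omega),
          show ('.' == c) = false by simpa [beq_iff_eq] using fun h => hc h.symm]

theorem pvSplitOn_eq (l : List Char) : PySem.Chars.splitOn l ['.'] = pvSplitA [] l := by
  have := pvGo_eq (l.length + 1) l [] [] (by omega)
  simpa [PySem.Chars.splitOn] using this

theorem pvFiltMap (l cur : List Char) :
    (((pvSplitA cur l).map String.ofList).filter (fun g => g != "")).map
        (fun g => (g.length : Int)) = pvGlAux cur.length l := by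
  induction l generalizing cur with
  | nil =>
    by_cases h : cur = [] <;>
      simp [pvSplitA, pvGlAux, h, PySem.Str.len, PySem.Chars.len,
        String.ext_iff]
  | cons c rest ih =>
    by_cases hc : c = '.'
    · subst hc
      by_cases h : cur = [] <;>
        simp [pvSplitA, pvGlAux, h, ih [], PySem.Str.len, PySem.Chars.len, String.ext_iff]
    · simpa [pvSplitA, pvGlAux, hc] using ih (c :: cur)

theorem pvZipDec (gs : List String) (gr : List Int) :
    (if gs.length ≠ gr.length then false else pvAZip (gs.zip gr)) =
      decide (gs.map (fun g => (g.length : Int)) = gr) := by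
  induction gs generalizing gr with
  | nil => cases gr <;> simp [pvAZip]
  | cons a t ih =>
    cases gr with
    | nil => simp
    | cons e gr' =>
      by_cases he : (a.length : Int) = e
      · by_cases hl : t.length = gr'.length
        · have h' := ih gr'
          rw [if_neg (by simp [hl])] at h'
          simp [pvAZip, he, hl, h']
        · have h1 : t.map (fun g => (g.length : Int)) ≠ gr' := fun h =>
            hl (by simpa using congrArg List.length h)
          simp [pvAZip, he, hl, h1]
      · by_cases hl : t.length = gr'.length <;> simp [pvAZip, he, hl]
  
theorem pvA_eq (c : String) (g : List Int) :
    is_valid_combination_py c g = decide (pvGlAux 0 c.toList = g) := by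
  have hsep : PySem.Str.split? c "." = some ((pvSplitA [] c.toList).map String.ofList) := by
    simp [PySem.Str.split?, PySem.Chars.split?, pvSplitOn_eq]
  unfold is_valid_combination_py
  rw [hsep]
  have hfm := pvFiltMap c.toList []
  simp only [List.length_nil] at hfm
  rw [← hfm, ← pvZipDec]

theorem pvFoldNone (grouping : List Int) (l : List Char) :
    l.foldl (pvAltStep grouping) none = none := by
  induction l with
  | nil => rfl
  | cons c rest ih => simpa [pvAltStep] using ih

theorem pvB_inv (grouping : List Int) (l : List Char) (i run : Nat) (hi : i ≤ grouping.length) :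
    pvAltFin grouping (l.foldl (pvAltStep grouping) (some (i, run))) =
      decide (pvGlAux run l = grouping.drop i) := by
  induction l generalizing i run with
  | nil =>
    by_cases hr : run = 0
    · subst hr
      have h2 : grouping.drop i = [] ↔ i = grouping.length := by
        rw [List.drop_eq_nil_iff]; omega
      simp only [List.foldl_nil, pvAltFin, pvGlAux]
      simp [eq_comm, h2]
    · simp only [List.foldl_nil, pvAltFin, pvGlAux]
      cases hg : grouping[i]? with
      | none =>
        have hge : grouping.length ≤ i := by simpa [List.getElem?_eq_none_iff] using hg
        have h2 : grouping.drop i = [] := by rw [List.drop_eq_nil_iff]; omega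
        simp [hr, hg, h2]
      | some v =>
        have hlt : i < grouping.length := by
          rcases List.getElem?_eq_some_iff.mp hg with ⟨h, _⟩; exact h
        have hdrop : grouping.drop i = grouping[i] :: grouping.drop (i + 1) :=
          List.drop_eq_getElem_cons hlt
        have hv : grouping[i] = v := by simpa [List.getElem?_eq_getElem hlt] using hg
        have h2 : grouping.drop (i + 1) = [] ↔ i + 1 = grouping.length := by
          rw [List.drop_eq_nil_iff]; omega
        rw [hdrop, hv]
        by_cases he : (run : Int) = v
        · by_cases hl : i + 1 = grouping.length
          · have hnil : grouping.drop (i + 1) = [] := h2.mpr hl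
            simp [hr, hg, he, hl, hnil]
          · have hne : grouping.drop (i + 1) ≠ [] := fun h => hl (h2.mp h)
            have hfalse : ¬ ([(run : Int)] = v :: grouping.drop (i + 1)) := by
              intro hcon
              injection hcon with _ h3
              exact hne h3.symm
            simp [hr, he, hl, hfalse]
            omega
        · simp [hr, hg, he]
  | cons c rest ih =>
    by_cases hc : c = '.'
    · subst hc
      by_cases hr : run = 0
      · subst hr
        simpa [pvAltStep, pvGlAux] using ih i 0 hi
      · cases hg : grouping[i]? with
        | none =>
          have hge : grouping.length ≤ i := by simpa [List.getElem?_eq_none_iff] using hg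
          have h2 : grouping.drop i = [] := by rw [List.drop_eq_nil_iff]; omega
          simp [pvAltStep, hr, hg, pvFoldNone, pvAltFin, pvGlAux, h2]
        | some v =>
          have hlt : i < grouping.length := by
            rcases List.getElem?_eq_some_iff.mp hg with ⟨h, _⟩; exact h
          have hdrop : grouping.drop i = grouping[i] :: grouping.drop (i + 1) :=
            List.drop_eq_getElem_cons hlt
          have hv : grouping[i] = v := by simpa [List.getElem?_eq_getElem hlt] using hg
          by_cases he : (run : Int) = v
          · have := ih (i + 1) 0 (by omega)
            rw [hdrop, hv]
            simp only [List.foldl_cons]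
            simp [pvAltStep, hr, hg, he, this, pvGlAux]
          · rw [hdrop, hv]
            simp only [List.foldl_cons]
            simp [pvAltStep, hr, hg, he, pvFoldNone, pvAltFin, pvGlAux]
    · simpa [pvAltStep, hc, pvGlAux] using ih i (run + 1) hi

-- ===== VERDICT (by name: the statement is the Claim_ definition above) =====
theorem is_valid_combination_py_spec : Claim_equal_is_valid_combination_py := by
  intro combination grouping _
  unfold Spec_is_valid_combination_py is_valid_combination_py_alt
  rw [pvA_eq, pvB_inv grouping combination.toList 0 0 (by omega)]
  simp
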